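-- pv_equiv track=rewrite | github.com/Gaelic-Algorithmic-Research-Group/Gaelic-Text-Normaliser | resources/gd_analyser_pipeline/crf_model_aux.py | isForeign
-- ===== SOURCE A (Python) =====
-- def isForeign(word):
--     for letter in word:
--         if letter in ['w', 'W', 'y', 'Y', 'k', 'K', 'x', 'X', 'z', 'Z', 'j', 'J', 'q', 'Q', 'v', 'V']:
--             return(True)
--     if 'oo' in word:
--         return(True)
--     if 'ee' in word:
--         return(True)
--     if 'pp' in word:
--         return(True)
--     if 'ss' in word:
--         return(True)
--     if 'ff' in word:
--         return(True)
--     if 'gg' in word: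
--         return(True)
--     if 'cc' in word:
--         return(True)
--     return(False)
-- ===== SOURCE B (Python) =====
-- def isForeign(word):
--     FOREIGN = set('wWyYkKxXzZjJqQvV')
--     DOUBLED = set('oepsfgc')
--     prev = None
--     for ch in word:
--         if ch in FOREIGN:
--             return True
--         if ch == prev and ch in DOUBLED:
--             return True
--         prev = ch
--     return False
-- ===== Notes on version B (the rewrite author's own statement) =====
-- stated objective: faster
-- what changed: Replaced the full letter scan plus seven separate substring searches with a single left-to-right pass that tracks the previous character and checks both the foreign-letter set and the doubled-digraph condition in one traversal, with early exit.
import Mathlib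
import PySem

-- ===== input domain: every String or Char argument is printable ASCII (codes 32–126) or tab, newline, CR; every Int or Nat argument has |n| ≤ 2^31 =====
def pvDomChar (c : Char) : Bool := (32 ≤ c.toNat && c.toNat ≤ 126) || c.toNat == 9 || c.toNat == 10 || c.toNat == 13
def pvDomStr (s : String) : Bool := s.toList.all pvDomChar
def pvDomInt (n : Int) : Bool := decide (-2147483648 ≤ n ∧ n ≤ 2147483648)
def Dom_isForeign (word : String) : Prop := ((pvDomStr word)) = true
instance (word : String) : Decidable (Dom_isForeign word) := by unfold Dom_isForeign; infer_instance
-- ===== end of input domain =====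

-- B replaces A's full letter scan plus seven separate substring searches by one pass tracking the previous character.

-- ===== PORT A =====
-- the per-letter membership test of A's for-loop
def pvForeignA (c : Char) : Bool :=
  ['w', 'W', 'y', 'Y', 'k', 'K', 'x', 'X', 'z', 'Z', 'j', 'J', 'q', 'Q', 'v', 'V'].contains c

-- A's for-loop: `some true` on early return, `none` if the loop falls through
def pvLoopA : List Char → Option Bool
  | [] => none
  | c :: rest => if pvForeignA c then some true else pvLoopA rest

def isForeign (word : String) : Bool :=
  match pvLoopA word.toList with
  | some b => b
  | none =>
    if PySem.Str.isIn "oo" word then true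
    else if PySem.Str.isIn "ee" word then true
    else if PySem.Str.isIn "pp" word then true
    else if PySem.Str.isIn "ss" word then true
    else if PySem.Str.isIn "ff" word then true
    else if PySem.Str.isIn "gg" word then true
    else if PySem.Str.isIn "cc" word then true
    else false

-- ===== PORT B =====
def pvFOREIGN : PySem.Set Char := PySem.Set.ofList "wWyYkKxXzZjJqQvV".toList
def pvDOUBLED : PySem.Set Char := PySem.Set.ofList "oepsfgc".toList

-- B's single pass, carrying the previous character (none before the first)
def pvScanB : Option Char → List Char → Bool
  | _, [] => false
  | prev, c :: rest =>
    if pvFOREIGN.contains c then true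
    else if prev == some c && pvDOUBLED.contains c then true
    else pvScanB (some c) rest

def isForeign_alt (word : String) : Bool := pvScanB none word.toList

-- ===== PRECONDITION & SPEC =====
def Spec_isForeign (word : String) (out : Bool) : Prop := out = isForeign_alt word
instance (word : String) (out : Bool) : Decidable (Spec_isForeign word out) := by unfold Spec_isForeign; infer_instance

-- ===== CLAIM (what is proved, stated in full; the proofs are below) =====
def Claim_equal_isForeign : Prop := ∀ (word : String), Dom_isForeign word → Spec_isForeign word (isForeign word)

-- ===== LEMMAS AND PROOFS =====

-- `true` iff the first character of l equals prev and is a doubled-digraph letter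
def pvHead (prev : Option Char) : List Char → Bool
  | [] => false
  | c :: _ => prev == some c && pvDOUBLED.contains c

-- `true` iff l has an adjacent equal pair, the second in the doubled-digraph set
def pvAdj : List Char → Bool
  | [] => false
  | c :: rest => pvHead (some c) rest || pvAdj rest

-- `true` iff [a,a] occurs as a contiguous substring of l
def pvPair (a : Char) : List Char → Bool
  | [] => false
  | b :: t => ((b == a) && (t.head? == some a)) || pvPair a t

theorem pvBeq (x y : Char) : (x == y) = decide (x = y) := rfl

theorem pvForeign_set_eq (c : Char) : pvFOREIGN.contains c = pvForeignA c := rfl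

theorem pvContainsD (b : Char) :
    pvDOUBLED.contains b =
      (decide (b = 'o') || decide (b = 'e') || decide (b = 'p') || decide (b = 's') ||
       decide (b = 'f') || decide (b = 'g') || decide (b = 'c')) := by
  have h : pvDOUBLED = ['o','e','p','s','f','g','c'] := by decide
  rw [h, PySem.Set.contains_eq_listContains]
  simp [Bool.or_assoc]

theorem pvLoopA_eq (l : List Char) (x : Bool) :
    (match pvLoopA l with | some b => b | none => x) = (l.any pvForeignA || x) := by
  induction l with
  | nil => simp [pvLoopA]
  | cons c t ih =>
    simp only [pvLoopA, List.any_cons]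
    cases pvForeignA c <;> simp [ih]

theorem pvHead_none (l : List Char) : pvHead none l = false := by
  cases l <;> rfl

theorem pvScanB_eq (l : List Char) : ∀ prev,
    pvScanB prev l = (pvHead prev l || (l.any pvForeignA || pvAdj l)) := by
  induction l with
  | nil => intro prev; simp [pvScanB, pvHead, pvAdj]
  | cons c t ih =>
    intro prev
    simp only [pvScanB, pvHead, pvAdj, List.any_cons, pvForeign_set_eq, ih (some c)]
    cases pvForeignA c <;> cases prev == some c && pvDOUBLED.contains c <;>
      cases pvHead (some c) t <;> cases t.any pvForeignA <;> simp

theorem pvPair_iff (a : Char) (l : List Char) : pvPair a l = true ↔ [a, a] <:+: l := by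
  induction l with
  | nil => simp [pvPair]
  | cons b t ih =>
    simp only [pvPair, List.infix_cons_iff, Bool.or_eq_true, Bool.and_eq_true, ih,
      List.cons_prefix_cons, beq_iff_eq]
    constructor
    · rintro (⟨hb, hh⟩ | h)
      · left
        cases t with
        | nil => simp at hh
        | cons u s =>
          simp only [List.head?_cons, Option.some.injEq] at hh
          exact ⟨hb.symm, by simp [hh.symm]⟩
      · right; exact h
    · rintro (⟨hb, hp⟩ | h)
      · left
        cases t with
        | nil => simp at hp
        | cons u s =>
          rcases List.cons_prefix_cons.mp hp with ⟨hu, _⟩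
          exact ⟨hb.symm, by simp [hu]⟩
      · right; exact h

theorem pvIsIn_pair (a : Char) (l : List Char) : PySem.Chars.isIn [a, a] l = pvPair a l := by
  rw [Bool.eq_iff_iff, PySem.Chars.isIn_iff_infix, pvPair_iff]

theorem pvPair_and (c b a : Char) : ((c == a) && (b == a)) = ((c == b) && (b == a)) := by
  by_cases h : b = a
  · subst h; rfl
  · simp [pvBeq, h]

theorem pvKey (c b : Char) :
    ((some c == some b) && pvDOUBLED.contains b) =
      (((c == 'o') && (b == 'o')) || ((c == 'e') && (b == 'e')) || ((c == 'p') && (b == 'p')) ||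
       ((c == 's') && (b == 's')) || ((c == 'f') && (b == 'f')) || ((c == 'g') && (b == 'g')) ||
       ((c == 'c') && (b == 'c'))) := by
  have hsome : (some c == some b) = (c == b) := rfl
  rw [hsome]
  simp only [pvPair_and c b]
  rw [pvContainsD]
  simp only [pvBeq, ← Bool.and_or_distrib_left]

theorem pvAdj_eq (l : List Char) :
    pvAdj l = (pvPair 'o' l || pvPair 'e' l || pvPair 'p' l || pvPair 's' l ||
               pvPair 'f' l || pvPair 'g' l || pvPair 'c' l) := by
  induction l with
  | nil => rfl
  | cons c t ih =>
    cases t with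
    | nil => simp [pvAdj, pvHead, pvPair]
    | cons b s =>
      have eAdj : pvAdj (c :: b :: s) =
          (((some c == some b) && pvDOUBLED.contains b) || pvAdj (b :: s)) := rfl
      have ePair : ∀ a, pvPair a (c :: b :: s) = (((c == a) && (b == a)) || pvPair a (b :: s)) :=
        fun a => rfl
      rw [eAdj, ih, pvKey c b, ePair 'o', ePair 'e', ePair 'p', ePair 's',
          ePair 'f', ePair 'g', ePair 'c']
      ac_rfl

theorem pvIf_or (a b : Bool) : (if a then true else b) = (a || b) := by cases a <;> simp

theorem isForeign_eq (word : String) :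
    isForeign word = (word.toList.any pvForeignA || pvAdj word.toList) := by
  unfold isForeign
  rw [pvLoopA_eq]
  simp only [pvIf_or]
  simp only [PySem.Str.isIn_eq]
  simp only [show ("oo".toList) = ['o','o'] from rfl, show ("ee".toList) = ['e','e'] from rfl,
      show ("pp".toList) = ['p','p'] from rfl, show ("ss".toList) = ['s','s'] from rfl,
      show ("ff".toList) = ['f','f'] from rfl, show ("gg".toList) = ['g','g'] from rfl,
      show ("cc".toList) = ['c','c'] from rfl]
  simp only [pvIsIn_pair, pvAdj_eq, Bool.or_false, Bool.or_assoc]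

-- ===== VERDICT =====
theorem isForeign_spec : Claim_equal_isForeign := by
  intro word _
  unfold Spec_isForeign isForeign_alt
  rw [isForeign_eq, pvScanB_eq, pvHead_none]
  simp
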